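-- pv_equiv track=rewrite | github.com/Aasthaengg/IBMdataset | Python_codes/p02735/s727206220.py | solve
-- ===== SOURCE A (Python) =====
-- def solve(h, w, matrix):
--     dp = [[[0, False] for x in range(w)] for y in range(h)]
--     for row in range(h):
--         for col in range(w):
--             dp[row][col][1] = matrix[row][col] == "#"
--             prev = False
--             if row > 0 and col > 0:
--                 if dp[row-1][col][0] < dp[row][col-1][0]:
--                     prev = dp[row-1][col][1]
--                     dp[row][col][0] = dp[row-1][col][0]
--                 elif dp[row-1][col][0] > dp[row][col-1][0]:
--                     prev = dp[row][col-1][1]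
--                     dp[row][col][0] = dp[row][col-1][0]
--                 else:
--                     prev = dp[row-1][col][1] or dp[row][col-1][1]
--                     dp[row][col][0] = dp[row][col-1][0]
--             elif row > 0:
--                 prev = dp[row-1][col][1]
--                 dp[row][col][0] = dp[row-1][col][0]
--             elif col > 0:
--                 prev = dp[row][col-1][1]
--                 dp[row][col][0] = dp[row][col-1][0]
--             if dp[row][col][1] and not prev:
--                 dp[row][col][0] += 1
--     return dp[h-1][w-1][0]
-- ===== SOURCE B (Python) =====
-- def solve(h, w, matrix):
--     # Anti-diagonal wavefront sweep: cells are processed in order of r+c, keeping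
--     # only the previous diagonal's costs; each cell is a weighted min over its
--     # up/left predecessors (weight 1 when stepping from a non-'#' cell onto '#').
--     # Order is valid because both predecessors of a cell lie on the previous diagonal.
--     prev = []
--     for d in range(h + w - 1):
--         lo = max(0, d - w + 1)          # rows present on diagonal d
--         hi = min(d, h - 1)
--         plo = max(0, d - w)             # first row of the previous diagonal
--         cur = []
--         for r in range(lo, hi + 1):
--             c = d - r
--             cell = matrix[r][c] == "#"
--             if d == 0:
--                 cur.append(1 if cell else 0)
--                 continue
--             best = None
--             if r > 0:
--                 best = prev[r - 1 - plo] + (1 if cell and matrix[r - 1][c] != "#" else 0)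
--             if c > 0:
--                 v = prev[r - plo] + (1 if cell and matrix[r][c - 1] != "#" else 0)
--                 best = v if best is None else min(best, v)
--             cur.append(best)
--         prev = cur
--     return prev[0]                      # last diagonal holds only (h-1, w-1)
-- ===== Notes on version B (the rewrite author's own statement) =====
-- stated objective: alternative
-- what changed: A fills a full h*w table of [cost, wall-flag] pairs in row-major order, picking the predecessor by a three-way comparison with an OR tie-break on the flags; B sweeps the grid by anti-diagonals (cells in order of r+c), keeps only the previous diagonal as a 1-D cost list (O(h+w) space, no flags, no 2-D table) and computes each cell as a uniform weighted min over its up/left predecessors.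
import Mathlib
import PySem

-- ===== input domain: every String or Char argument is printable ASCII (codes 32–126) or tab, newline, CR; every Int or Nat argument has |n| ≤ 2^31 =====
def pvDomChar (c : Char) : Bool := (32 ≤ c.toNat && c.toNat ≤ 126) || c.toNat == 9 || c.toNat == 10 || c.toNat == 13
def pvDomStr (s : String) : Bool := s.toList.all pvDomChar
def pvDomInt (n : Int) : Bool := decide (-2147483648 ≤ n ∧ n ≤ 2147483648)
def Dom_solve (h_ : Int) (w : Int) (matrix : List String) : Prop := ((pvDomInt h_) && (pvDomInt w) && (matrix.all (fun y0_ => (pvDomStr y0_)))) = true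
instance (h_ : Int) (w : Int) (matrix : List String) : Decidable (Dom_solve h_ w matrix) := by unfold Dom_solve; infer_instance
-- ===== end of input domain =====

-- B replaces A's row-major 2-D table of (cost, wall-flag) pairs by an anti-diagonal sweep that
-- keeps only the previous diagonal as a 1-D cost list and takes a weighted min; objective: alternative.

-- matrix[r][c] == "#"; the getD defaults are read only outside Pre_solve, where Python raises IndexError
def charAt (m : List String) (r c : Nat) : Bool := ((m.getD r "").toList.getD c ' ') == '#'

-- ===== PORT A =====
-- body of A's inner `for col in range(w)` loop: the new dp cell [cost, is_wall]
def stepA (m : List String) (row : Nat) (prev cur : List (Int × Bool)) (col : Nat) : Int × Bool :=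
  let wall := charAt m row col
  let pb : Int × Bool :=
    if 0 < row ∧ 0 < col then
      let up := prev.getD col (0, false)
      let lf := cur.getD (col - 1) (0, false)
      if up.1 < lf.1 then (up.1, up.2)
      else if lf.1 < up.1 then (lf.1, lf.2)
      else (lf.1, up.2 || lf.2)
    else if 0 < row then
      let up := prev.getD col (0, false)
      (up.1, up.2)
    else if 0 < col then
      let lf := cur.getD (col - 1) (0, false)
      (lf.1, lf.2)
    else (0, false)
  (if wall && !pb.2 then pb.1 + 1 else pb.1, wall)

def rowA (m : List String) (row : Nat) (prev : List (Int × Bool)) (w : Nat) : List (Int × Bool) :=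
  (List.range w).foldl (fun cur col => cur ++ [stepA m row prev cur col]) []

def solve (h_ : Int) (w : Int) (matrix : List String) : Int :=
  let dp := (List.range h_.toNat).foldl
    (fun dp row => dp ++ [rowA matrix row (dp.getD (row - 1) []) w.toNat]) []
  ((dp.getD (h_ - 1).toNat []).getD (w - 1).toNat (0, false)).1

-- ===== PORT B =====
-- body of B's inner loop: cell (r, d-r) on diagonal d, reading the previous diagonal `prev`
-- (whose first row is `plo`); `best` starts as None and is min-merged per existing predecessor
def stepD (m : List String) (d plo : Nat) (prev : List Int) (r : Nat) : Int :=
  let c := d - r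
  let cell := charAt m r c
  if d = 0 then (if cell then 1 else 0)
  else
    let b0 : Option Int := none
    let b1 : Option Int :=
      if 0 < r then some (prev.getD (r - 1 - plo) 0 + (if cell && !(charAt m (r - 1) c) then 1 else 0))
      else b0
    let b2 : Option Int :=
      if 0 < c then
        let v := prev.getD (r - plo) 0 + (if cell && !(charAt m r (c - 1)) then 1 else 0)
        some (match b1 with | none => v | some a => min a v)
      else b1
    b2.getD 0

-- one diagonal: `for r in range(lo, lo+n): cur.append(stepD …)`
def diagB (m : List String) (d lo n plo : Nat) (prev : List Int) : List Int :=
  (List.range' lo n).map (stepD m d plo prev)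

-- the sweep over diagonals d = 0 .. k-1
def sweep (m : List String) (H W k : Nat) : List Int :=
  (List.range k).foldl
    (fun prev d => diagB m d (d + 1 - W) (min d (H - 1) + 1 - (d + 1 - W)) (d - W) prev) []

def solve_alt (h_ : Int) (w : Int) (matrix : List String) : Int :=
  (sweep matrix h_.toNat w.toNat (h_.toNat + w.toNat - 1)).getD 0 0

-- ===== PRECONDITION & SPEC =====
-- Pre_ excludes exactly the inputs on which Python A raises IndexError: h ≤ 0 or w ≤ 0
-- (dp[h-1][w-1] on an empty dp) or a visited matrix row/character missing.
def Pre_solve (h_ : Int) (w : Int) (matrix : List String) : Prop :=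
  1 ≤ h_ ∧ 1 ≤ w ∧ h_.toNat ≤ matrix.length ∧
    ((matrix.take h_.toNat).all (fun s => w.toNat ≤ s.toList.length)) = true
instance (h_ : Int) (w : Int) (matrix : List String) : Decidable (Pre_solve h_ w matrix) := by
  unfold Pre_solve; infer_instance
def pvWitness_solve : Int × Int × List String := (2, 2, ["#.", ".#"])
def Spec_solve (h_ : Int) (w : Int) (matrix : List String) (out : Int) : Prop := out = solve_alt h_ w matrix
instance (h_ : Int) (w : Int) (matrix : List String) (out : Int) : Decidable (Spec_solve h_ w matrix out) := by unfold Spec_solve; infer_instance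

-- ===== CLAIM (what is proved, stated in full; the proofs are below) =====
def Claim_equal_solve : Prop := ∀ (h_ : Int) (w : Int) (matrix : List String), Dom_solve h_ w matrix → Pre_solve h_ w matrix → Spec_solve h_ w matrix (solve h_ w matrix)

-- ===== LEMMAS AND PROOFS =====

-- the mathematical DP value both ports compute: minimal '.'→'#' transition count to (r, c)
def fval (m : List String) (r c : Nat) : Int :=
  if hr : r = 0 then
    if hc : c = 0 then (if charAt m 0 0 then 1 else 0)
    else fval m 0 (c - 1) + (if charAt m 0 c && !(charAt m 0 (c - 1)) then 1 else 0)
  else if hc : c = 0 then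
    fval m (r - 1) 0 + (if charAt m r 0 && !(charAt m (r - 1) 0) then 1 else 0)
  else
    min (fval m (r - 1) c + (if charAt m r c && !(charAt m (r - 1) c) then 1 else 0))
        (fval m r (c - 1) + (if charAt m r c && !(charAt m r (c - 1)) then 1 else 0))
termination_by r + c
decreasing_by all_goals omega

theorem fval_00 (m : List String) : fval m 0 0 = (if charAt m 0 0 then 1 else 0) := by
  rw [fval]; simp

theorem fval_top (m : List String) (c : Nat) (hc : 0 < c) :
    fval m 0 c = fval m 0 (c - 1) + (if charAt m 0 c && !(charAt m 0 (c - 1)) then 1 else 0) := by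
  rw [fval]; simp [Nat.pos_iff_ne_zero.mp hc]

theorem fval_left (m : List String) (r : Nat) (hr : 0 < r) :
    fval m r 0 = fval m (r - 1) 0 + (if charAt m r 0 && !(charAt m (r - 1) 0) then 1 else 0) := by
  rw [fval]; simp [Nat.pos_iff_ne_zero.mp hr]

theorem fval_int (m : List String) (r c : Nat) (hr : 0 < r) (hc : 0 < c) :
    fval m r c = min (fval m (r - 1) c + (if charAt m r c && !(charAt m (r - 1) c) then 1 else 0))
                     (fval m r (c - 1) + (if charAt m r c && !(charAt m r (c - 1)) then 1 else 0)) := by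
  rw [fval]; simp [Nat.pos_iff_ne_zero.mp hr, Nat.pos_iff_ne_zero.mp hc]

theorem getD_snoc_lt {α : Type} (l : List α) (x d : α) (c : Nat) (h : c < l.length) :
    (l ++ [x]).getD c d = l.getD c d := by
  simp [List.getD, List.getElem?_append_left h]

theorem getD_snoc_self {α : Type} (l : List α) (x d : α) (c : Nat) (h : c = l.length) :
    (l ++ [x]).getD c d = x := by
  subst h; simp [List.getD]

theorem foldl_grow_length {α β : Type} (f : List α → β → List α)
    (hf : ∀ cur x, (f cur x).length = cur.length + 1) :
    ∀ (l : List β) (init : List α), (l.foldl f init).length = init.length + l.length := by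
  intro l
  induction l with
  | nil => simp
  | cons x xs ih => intro init; simp [List.foldl_cons, ih, hf]; omega

theorem rowA_length (m : List String) (row : Nat) (prev : List (Int × Bool)) (w : Nat) :
    (rowA m row prev w).length = w := by
  unfold rowA
  rw [foldl_grow_length _ (fun cur x => by simp)]
  simp

-- A's row r satisfies: every filled cell is (fval, wall)
def RAe (m : List String) (r : Nat) (a : List (Int × Bool)) : Prop :=
  ∀ c, c < a.length → a.getD c (0, false) = (fval m r c, charAt m r c)

-- pointwise: A's branch-and-flag update equals the weighted min (interior cell)
theorem cell_eq (u l : Int) (wu wl cell : Bool) :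
    (if cell && !(if u < l then (u, wu) else if l < u then (l, wl) else (l, wu || wl)).2
      then (if u < l then (u, wu) else if l < u then (l, wl) else (l, wu || wl)).1 + 1
      else (if u < l then (u, wu) else if l < u then (l, wl) else (l, wu || wl)).1)
    = min (u + if cell && !wu then 1 else 0) (l + if cell && !wl then 1 else 0) := by
  cases cell <;> cases wu <;> cases wl <;> by_cases h1 : u < l <;> by_cases h2 : l < u <;>
    simp [h1, h2, min_def] <;> (try split_ifs) <;> omega

theorem stepA_eq (m : List String) (row : Nat) (pa : List (Int × Bool))
    (ca : List (Int × Bool)) (n : Nat)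
    (hprev : 0 < row → RAe m (row - 1) pa) (hlen : 0 < row → n < pa.length)
    (hca : RAe m row ca) (hcl : ca.length = n) :
    stepA m row pa ca n = (fval m row n, charAt m row n) := by
  unfold stepA
  by_cases hr : 0 < row <;> by_cases hc : 0 < n
  · have hup := hprev hr n (hlen hr)
    have hlf := hca (n - 1) (by omega)
    have hb : 0 < row ∧ 0 < n := ⟨hr, hc⟩
    simp only [if_pos hb, hup, hlf]
    rw [fval_int m row n hr hc]
    exact Prod.ext (cell_eq _ _ _ _ _) rfl
  · have hn0 : n = 0 := by omega
    subst hn0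
    have hup := hprev hr 0 (hlen hr)
    simp only [List.getD] at hup
    rw [fval_left m row hr]
    simp [hr, hup]
    split_ifs <;> omega
  · have hr0 : row = 0 := by omega
    subst hr0
    have hlf := hca (n - 1) (by omega)
    simp only [List.getD] at hlf
    rw [fval_top m n hc]
    simp [hc, hlf]
    split_ifs <;> omega
  · have hr0 : row = 0 := by omega
    have hn0 : n = 0 := by omega
    subst hr0; subst hn0
    rw [fval_00]
    simp

theorem rowA_spec (m : List String) (row : Nat) (pa : List (Int × Bool))
    (hprev : 0 < row → RAe m (row - 1) pa) :
    ∀ n, (0 < row → n ≤ pa.length) → RAe m row (rowA m row pa n) := by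
  intro n
  induction n with
  | zero => intro _ c hcl; simp [rowA] at hcl
  | succ n ih =>
    intro hn
    have IH := ih (fun h => le_trans (Nat.le_succ n) (hn h))
    have hca : (rowA m row pa n).length = n := rowA_length m row pa n
    have hA : rowA m row pa (n + 1)
        = rowA m row pa n ++ [stepA m row pa (rowA m row pa n) n] := by
      unfold rowA; rw [List.range_succ, List.foldl_append]; rfl
    have hstep := stepA_eq m row pa (rowA m row pa n) n hprev
      (fun h => lt_of_lt_of_le (Nat.lt_succ_self n) (hn h)) IH hca
    rw [hA]
    intro c hcl
    simp only [List.length_append, List.length_cons, List.length_nil, hca] at hcl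
    rcases Nat.lt_or_ge c n with h | h
    · rw [getD_snoc_lt _ _ _ c (by omega)]
      exact IH c (by omega)
    · have hcn : c = n := by omega
      subst hcn
      rw [getD_snoc_self _ _ _ _ hca.symm]
      exact hstep

theorem rows_spec (m : List String) (w : Nat) : ∀ k,
    (((List.range k).foldl (fun dp row => dp ++ [rowA m row (dp.getD (row - 1) []) w]) []).length = k) ∧
    (∀ r, r < k →
      (((List.range k).foldl (fun dp row => dp ++ [rowA m row (dp.getD (row - 1) []) w]) []).getD r []).length = w ∧
      RAe m r (((List.range k).foldl (fun dp row => dp ++ [rowA m row (dp.getD (row - 1) []) w]) []).getD r [])) := by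
  intro k
  induction k with
  | zero => exact ⟨rfl, fun r hr => absurd hr (Nat.not_lt_zero r)⟩
  | succ k ih =>
    obtain ⟨hlA, hrows⟩ := ih
    have hA : (List.range (k + 1)).foldl (fun dp row => dp ++ [rowA m row (dp.getD (row - 1) []) w]) []
        = ((List.range k).foldl (fun dp row => dp ++ [rowA m row (dp.getD (row - 1) []) w]) [])
          ++ [rowA m k (((List.range k).foldl (fun dp row => dp ++ [rowA m row (dp.getD (row - 1) []) w]) []).getD (k - 1) []) w] := by
      rw [List.range_succ, List.foldl_append]; rfl
    have hnew : RAe m k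
        (rowA m k (((List.range k).foldl (fun dp row => dp ++ [rowA m row (dp.getD (row - 1) []) w]) []).getD (k - 1) []) w) := by
      apply rowA_spec
      · intro hk
        exact (hrows (k - 1) (by omega)).2
      · intro hk
        rw [(hrows (k - 1) (by omega)).1]
    rw [hA]
    refine ⟨by simp only [List.length_append, hlA, List.length_cons, List.length_nil], ?_⟩
    intro r hr
    rcases Nat.lt_or_ge r k with h | h
    · rw [getD_snoc_lt _ _ _ r (by omega)]
      exact hrows r h
    · have hrk : r = k := by omega
      subst hrk
      rw [getD_snoc_self _ _ _ _ hlA.symm]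
      exact ⟨rowA_length _ _ _ _, hnew⟩

-- ========== B side ==========

theorem getD_map_range' (f : Nat → Int) (lo n i : Nat) (h : i < n) :
    ((List.range' lo n).map f).getD i 0 = f (lo + i) := by
  have hl : i < ((List.range' lo n).map f).length := by simp [h]
  rw [List.getD_eq_getElem _ _ hl]
  simp

-- the fold over diagonals peels its last step
theorem sweep_succ (m : List String) (H W d : Nat) :
    sweep m H W (d + 1)
      = diagB m d (d + 1 - W) (min d (H - 1) + 1 - (d + 1 - W)) (d - W) (sweep m H W d) := by
  unfold sweep; rw [List.range_succ, List.foldl_append]; rfl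

theorem stepD_eq (m : List String) (H W d r : Nat) (_hH : 0 < H) (hW : 0 < W)
    (prev : List Int) (hd : 0 < d) (hrd : r ≤ d) (hrH : r ≤ H - 1) (hlo : d + 1 - W ≤ r)
    (hprev : ∀ j, j < min (d - 1) (H - 1) + 1 - (d - W) →
      prev.getD j 0 = fval m ((d - W) + j) ((d - 1) - ((d - W) + j))) :
    stepD m d (d - W) prev r = fval m r (d - r) := by
  unfold stepD
  simp only [Nat.pos_iff_ne_zero.mp hd, if_false]
  by_cases hr : 0 < r <;> by_cases hc : 0 < d - r
  · -- interior
    have hup := hprev (r - 1 - (d - W)) (by omega)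
    have harg1 : (d - W) + (r - 1 - (d - W)) = r - 1 := by omega
    have harg2 : (d - 1) - (r - 1) = d - r := by omega
    rw [harg1, harg2] at hup
    have hlf := hprev (r - (d - W)) (by omega)
    have harg3 : (d - W) + (r - (d - W)) = r := by omega
    have harg4 : (d - 1) - r = d - r - 1 := by omega
    rw [harg3, harg4] at hlf
    simp only [hr, hc, if_true, hup, hlf, Option.getD_some]
    rw [fval_int m r (d - r) hr hc]
  · -- c = 0, r = d > 0
    have hdr : d - r = 0 := by omega
    have hup := hprev (r - 1 - (d - W)) (by omega)
    have harg1 : (d - W) + (r - 1 - (d - W)) = r - 1 := by omega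
    have harg2 : (d - 1) - (r - 1) = 0 := by omega
    rw [harg1, harg2] at hup
    simp only [hr, hdr, hup, lt_self_iff_false, if_true, if_false, Option.getD_some]
    rw [fval_left m r hr]
  · -- r = 0, c = d > 0
    have hr0 : r = 0 := by omega
    subst hr0
    have hlf := hprev (0 - (d - W)) (by omega)
    have harg3 : (d - W) + (0 - (d - W)) = 0 := by omega
    have harg4 : (d - 1) - 0 = d - 0 - 1 := by omega
    rw [harg3, harg4] at hlf
    simp only [lt_irrefl, if_false, hc, if_true, hlf, Option.getD_some]
    rw [fval_top m (d - 0) hc]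
  · omega

theorem sweep_spec (m : List String) (H W : Nat) (hH : 0 < H) (hW : 0 < W) :
    ∀ d i, i < min d (H - 1) + 1 - (d + 1 - W) →
      (sweep m H W (d + 1)).getD i 0 = fval m ((d + 1 - W) + i) (d - ((d + 1 - W) + i)) := by
  intro d
  induction d with
  | zero =>
    intro i hi
    have hi0 : i = 0 := by omega
    subst hi0
    rw [sweep_succ]
    unfold diagB
    rw [getD_map_range' _ _ _ 0 (by omega)]
    have h1 : (0 + 1 - W) = 0 := by omega
    rw [h1]
    unfold stepD
    simp [fval_00]
  | succ d ih =>
    intro i hi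
    rw [sweep_succ]
    unfold diagB
    rw [getD_map_range' _ _ _ i hi]
    apply stepD_eq m H W (d + 1) _ hH hW _ (by omega) (by omega) (by omega) (by omega)
    intro j hj
    have h1 : d + 1 - 1 = d := by omega
    have h2 : d + 1 - W = d + 1 - W := rfl
    rw [h1]
    have := ih j (by omega)
    simpa using this

-- ===== VERDICT (by name: the statement is the Claim_ definition above) =====
theorem solve_spec : Claim_equal_solve := by
  intro h_ w m _ hpre
  obtain ⟨hh, hw, _, _⟩ := hpre
  have hH : 0 < h_.toNat := by omega
  have hW : 0 < w.toNat := by omega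
  -- A's value is fval (H-1) (W-1)
  obtain ⟨hlA, hrows⟩ := rows_spec m w.toNat h_.toNat
  obtain ⟨hlen, hrel⟩ := hrows (h_.toNat - 1) (by omega)
  have h1 : (h_ - 1).toNat = h_.toNat - 1 := by omega
  have h2 : (w - 1).toNat = w.toNat - 1 := by omega
  have hAval := hrel (w.toNat - 1) (by omega)
  -- B's value is fval (H-1) (W-1)
  have hk : h_.toNat + w.toNat - 1 = (h_.toNat + w.toNat - 2) + 1 := by omega
  have hBval := sweep_spec m h_.toNat w.toNat hH hW (h_.toNat + w.toNat - 2) 0 (by omega)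
  have h3 : (h_.toNat + w.toNat - 2 + 1 - w.toNat) + 0 = h_.toNat - 1 := by omega
  rw [h3] at hBval
  have h4 : (h_.toNat + w.toNat - 2) - (h_.toNat - 1) = w.toNat - 1 := by omega
  rw [h4] at hBval
  show solve h_ w m = solve_alt h_ w m
  simp only [solve, solve_alt]
  rw [h1, h2, hAval, hk, hBval]
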